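-- pv_equiv track=rewrite | github.com/MaximF39/StarWars | python/Config/CFG_StaticSpaceObject/portal.py | get_to_id
-- ===== SOURCE A (Python) =====
-- hives = [
--     {10: 48}, # КОнтр - Инфель
--     {48: 10}, # Инфель - контр
--     {48: 19}, # Инфель - хаглд
--     {50: 52}, # А"Кирс Он"кирт
--     {52: 50}, # Он"кирт А"Кирс
--     {96: 19}, # Овдар - хаглд
--     {19: 19}
-- ]
--
-- def get_to_id(to_id, count):
--     for d in hives:
--         if to_id in d:
--             if count == 2:
--                 count -= 1
--                 continue
--             return d[to_id]
--     return 19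
-- ===== SOURCE B (Python) =====
-- hives = [
--     {10: 48},
--     {48: 10},
--     {48: 19},
--     {50: 52},
--     {52: 50},
--     {96: 19},
--     {19: 19}
-- ]
--
-- index = {}
-- for _d in hives:
--     for _k, _v in _d.items():
--         index.setdefault(_k, []).append(_v)
--
-- def get_to_id(to_id, count):
--     vals = index.get(to_id)
--     if not vals:
--         return 19
--     if count == 2:
--         return vals[1] if len(vals) > 1 else 19
--     return vals[0]
-- ===== Notes on version B (the rewrite author's own statement) =====
-- stated objective: simpler
-- what changed: Replaced the runtime scan-and-skip over the list of singleton dicts with a module-level grouped index (key -> list of destinations built once), so the lookup is a single dict access plus index selection by count.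
import Mathlib
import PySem

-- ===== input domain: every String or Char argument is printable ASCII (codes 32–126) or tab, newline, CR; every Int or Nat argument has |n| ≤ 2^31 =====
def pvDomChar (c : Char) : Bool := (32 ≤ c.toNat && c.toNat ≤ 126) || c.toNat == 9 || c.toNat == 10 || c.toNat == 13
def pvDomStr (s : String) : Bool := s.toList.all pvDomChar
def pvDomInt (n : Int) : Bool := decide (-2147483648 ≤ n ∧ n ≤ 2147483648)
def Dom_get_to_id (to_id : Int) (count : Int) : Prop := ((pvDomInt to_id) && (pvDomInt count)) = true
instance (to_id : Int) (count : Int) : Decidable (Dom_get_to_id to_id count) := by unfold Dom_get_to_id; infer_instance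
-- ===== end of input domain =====

-- B replaces A's scan-and-skip over the dict list with a grouped index built once (key -> list of
-- destinations) and a direct lookup; objective: simpler. Return values agree everywhere.

-- ===== PORT A =====
-- the module constant `hives`: a list of one-entry dicts
def hives : List (PySem.Dict Int Int) :=
  [PySem.Dict.ofList [(10, 48)], PySem.Dict.ofList [(48, 10)], PySem.Dict.ofList [(48, 19)],
   PySem.Dict.ofList [(50, 52)], PySem.Dict.ofList [(52, 50)], PySem.Dict.ofList [(96, 19)],
   PySem.Dict.ofList [(19, 19)]]

-- the `for d in hives:` loop, carrying the mutable `count`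
def get_to_id_loop (ds : List (PySem.Dict Int Int)) (to_id : Int) (count : Int) : Int :=
  match ds with
  | [] => 19
  | d :: rest =>
    match PySem.Dict.get? d to_id with
    | some v => if count == 2 then get_to_id_loop rest to_id (count - 1) else v
    | none => get_to_id_loop rest to_id count

def get_to_id (to_id : Int) (count : Int) : Int :=
  get_to_id_loop hives to_id count

-- ===== PORT B =====
-- the module-level grouped index: for each entry of hives, append the value to index[key]
-- index.setdefault(k, []).append(v)  =  modify k [] (· ++ [v])
def index : PySem.Dict Int (List Int) :=
  hives.foldl (fun acc d =>
    d.items.foldl (fun acc kv =>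
      PySem.Dict.modify acc kv.1 [] (· ++ [kv.2])) acc) PySem.Dict.empty

def get_to_id_alt (to_id : Int) (count : Int) : Int :=
  match PySem.Dict.get? index to_id with
  | none => 19
  | some vals =>
    if vals.isEmpty then 19
    else if count == 2 then
      if vals.length > 1 then (PySem.List.pyGet? vals 1).getD 19 else 19
    else (PySem.List.pyGet? vals 0).getD 19

-- ===== PRECONDITION & SPEC =====
def Spec_get_to_id (to_id : Int) (count : Int) (out : Int) : Prop := out = get_to_id_alt to_id count
instance (to_id : Int) (count : Int) (out : Int) : Decidable (Spec_get_to_id to_id count out) := by unfold Spec_get_to_id; infer_instance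

-- ===== CLAIM (what is proved, stated in full; the proofs are below) =====
def Claim_equal_get_to_id : Prop := ∀ (to_id : Int) (count : Int), Dom_get_to_id to_id count → Spec_get_to_id to_id count (get_to_id to_id count)

-- ===== LEMMAS AND PROOFS =====

-- both sides depend on to_id only through equality with the six keys of hives; case on them,
-- then on count == 2, and evaluate both ports.
-- the computed values of the module constants, as literal dicts
theorem hives_eval : hives = [PySem.Dict.mk [(10,48)], PySem.Dict.mk [(48,10)], PySem.Dict.mk [(48,19)],
    PySem.Dict.mk [(50,52)], PySem.Dict.mk [(52,50)], PySem.Dict.mk [(96,19)], PySem.Dict.mk [(19,19)]] := rfl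

theorem index_eval : index = PySem.Dict.mk
    [(10,[48]), (48,[10,19]), (50,[52]), (52,[50]), (96,[19]), (19,[19])] := rfl

-- case on to_id against the six keys of hives, then on count == 2, and evaluate both ports
theorem get_to_id_eq_alt (to_id : Int) (count : Int) :
    get_to_id to_id count = get_to_id_alt to_id count := by
  by_cases h10 : to_id = 10
  · subst h10
    by_cases h2 : count = 2
    · subst h2; decide
    · have hc : (count == 2) = false := by simp [h2]
      simp only [get_to_id, get_to_id_alt, get_to_id_loop, hives_eval, index_eval, hc,
        PySem.Dict.get?]
      simp [PySem.List.pyGet?, PySem.List.pyIdx?, List.find?]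
  by_cases h48 : to_id = 48
  · subst h48
    by_cases h2 : count = 2
    · subst h2; decide
    · have hc : (count == 2) = false := by simp [h2]
      simp only [get_to_id, get_to_id_alt, get_to_id_loop, hives_eval, index_eval, hc,
        PySem.Dict.get?]
      simp [PySem.List.pyGet?, PySem.List.pyIdx?, List.find?]
  by_cases h50 : to_id = 50
  · subst h50
    by_cases h2 : count = 2
    · subst h2; decide
    · have hc : (count == 2) = false := by simp [h2]
      simp only [get_to_id, get_to_id_alt, get_to_id_loop, hives_eval, index_eval, hc,
        PySem.Dict.get?]
      simp [PySem.List.pyGet?, PySem.List.pyIdx?, List.find?]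
  by_cases h52 : to_id = 52
  · subst h52
    by_cases h2 : count = 2
    · subst h2; decide
    · have hc : (count == 2) = false := by simp [h2]
      simp only [get_to_id, get_to_id_alt, get_to_id_loop, hives_eval, index_eval, hc,
        PySem.Dict.get?]
      simp [PySem.List.pyGet?, PySem.List.pyIdx?, List.find?]
  by_cases h96 : to_id = 96
  · subst h96
    by_cases h2 : count = 2
    · subst h2; decide
    · have hc : (count == 2) = false := by simp [h2]
      simp only [get_to_id, get_to_id_alt, get_to_id_loop, hives_eval, index_eval, hc,
        PySem.Dict.get?]
      simp [PySem.List.pyGet?, PySem.List.pyIdx?, List.find?]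
  by_cases h19 : to_id = 19
  · subst h19
    by_cases h2 : count = 2
    · subst h2; decide
    · have hc : (count == 2) = false := by simp [h2]
      simp only [get_to_id, get_to_id_alt, get_to_id_loop, hives_eval, index_eval, hc,
        PySem.Dict.get?]
      simp [PySem.List.pyGet?, PySem.List.pyIdx?, List.find?]
  -- to_id matches no key: both sides return 19
  have hc2 : ∀ c : Int, get_to_id_loop hives to_id c = 19 := by
    intro c
    have b10 : ((10:Int) == to_id) = false := by simp [Ne.symm h10]
    have b48 : ((48:Int) == to_id) = false := by simp [Ne.symm h48]
    have b50 : ((50:Int) == to_id) = false := by simp [Ne.symm h50]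
    have b52 : ((52:Int) == to_id) = false := by simp [Ne.symm h52]
    have b96 : ((96:Int) == to_id) = false := by simp [Ne.symm h96]
    have b19 : ((19:Int) == to_id) = false := by simp [Ne.symm h19]
    simp only [get_to_id_loop, hives_eval, PySem.Dict.get?, List.find?,
      b10, b48, b50, b52, b96, b19, Option.map_none]
  have b10 : ((10:Int) == to_id) = false := by simp [Ne.symm h10]
  have b48 : ((48:Int) == to_id) = false := by simp [Ne.symm h48]
  have b50 : ((50:Int) == to_id) = false := by simp [Ne.symm h50]
  have b52 : ((52:Int) == to_id) = false := by simp [Ne.symm h52]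
  have b96 : ((96:Int) == to_id) = false := by simp [Ne.symm h96]
  have b19 : ((19:Int) == to_id) = false := by simp [Ne.symm h19]
  simp only [get_to_id, get_to_id_alt, hc2, index_eval,
    PySem.Dict.get?, List.find?, b10, b48, b50, b52, b96, b19, Option.map_none]

-- ===== VERDICT (by name: the statement is the Claim_ definition above) =====
theorem get_to_id_spec : Claim_equal_get_to_id := by
  intro to_id count _
  exact get_to_id_eq_alt to_id count
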